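-- pv_equiv track=rewrite | github.com/9ranjal/Babel | chunking/core/enrichment/enhancer.py | _merge_similar_keywords
-- ===== SOURCE A (Python) =====
-- from typing import Dict, Any, List, Optional
--
-- def _merge_similar_keywords(keywords: List[str]) -> List[str]:
--     """
--     Merge similar keywords to reduce redundancy.
--
--     Args:
--         keywords: List of keywords to merge
--
--     Returns:
--         List of merged keywords
--     """
--     if not keywords:
--         return []
--
--     # Sort by length (longer keywords first)
--     sorted_keywords = sorted(keywords, key=len, reverse=True)
--     merged = []
--
--     for keyword in sorted_keywords:
--         # Check if this keyword is already covered by a longer keyword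
--         is_covered = False
--         for existing in merged:
--             # If existing keyword contains this one, skip
--             if keyword.lower() in existing.lower() and len(keyword) < len(existing):
--                 is_covered = True
--                 break
--             # If this keyword contains existing one, replace
--             elif existing.lower() in keyword.lower() and len(existing) < len(keyword):
--                 merged.remove(existing)
--                 break
--
--         if not is_covered:
--             merged.append(keyword)
--
--     return merged
-- ===== SOURCE B (Python) =====
-- def _merge_similar_keywords(keywords):
--     if not keywords:
--         return []
--     lows = [(kw.lower(), len(kw)) for kw in keywords]
--     ordered = sorted(keywords, key=len, reverse=True)
--     return [k for k in ordered
--             if not any(k.lower() in lo and len(k) < ln for lo, ln in lows)]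
-- ===== Notes on version B (the rewrite author's own statement) =====
-- stated objective: simpler
-- what changed: A's stateful accumulator loop (with a dead 'replace existing' branch and in-place remove) is replaced by a stateless filter: keep a sorted keyword iff no strictly longer keyword of the whole input contains it case-insensitively; lowercase forms are precomputed once.
import Mathlib
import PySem

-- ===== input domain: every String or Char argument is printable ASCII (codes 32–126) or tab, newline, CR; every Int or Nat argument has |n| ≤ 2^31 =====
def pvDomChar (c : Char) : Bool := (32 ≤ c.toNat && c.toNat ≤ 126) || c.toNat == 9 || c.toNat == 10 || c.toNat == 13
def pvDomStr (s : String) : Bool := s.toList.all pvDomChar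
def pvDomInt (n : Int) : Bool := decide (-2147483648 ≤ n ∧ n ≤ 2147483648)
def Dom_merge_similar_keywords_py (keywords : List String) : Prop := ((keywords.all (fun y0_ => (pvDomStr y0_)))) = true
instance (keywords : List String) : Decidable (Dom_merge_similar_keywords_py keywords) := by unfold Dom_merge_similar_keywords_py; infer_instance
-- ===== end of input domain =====

-- B replaces A's accumulator loop (whose "replace existing" branch is dead code, since the
-- list is scanned in length-descending order) by a single stateless filter of the sorted list
-- against the whole input: keep a keyword iff no strictly longer input keyword contains it
-- case-insensitively.  Objective: simpler.

-- ===== PORT A =====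
-- outcome of A's inner 'for existing in merged' loop (break/remove/fall-through)
inductive PvScan where
  | covered : PvScan
  | replace : String → PvScan
  | fall : PvScan
deriving DecidableEq

def pvScanA (k : String) : List String → PvScan
  | [] => .fall
  | e :: rest =>
    if PySem.Str.isIn (PySem.Str.lower k) (PySem.Str.lower e)
        && decide (PySem.Str.len k < PySem.Str.len e) then .covered
    else if PySem.Str.isIn (PySem.Str.lower e) (PySem.Str.lower k)
        && decide (PySem.Str.len e < PySem.Str.len k) then .replace e
    else pvScanA k rest

def pvStepA (merged : List String) (k : String) : List String :=
  match pvScanA k merged with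
  | .covered => merged                                                -- is_covered: skip
  | .replace e => ((PySem.List.remove? merged e).getD merged) ++ [k]  -- merged.remove(existing), then append
      -- the scanned element is in merged, so remove? is always 'some'; getD never takes the default
  | .fall => merged ++ [k]                                            -- append

def merge_similar_keywords_py (keywords : List String) : List String :=
  if keywords = [] then []
  else
    (PySem.List.sorted keywords (fun s => PySem.Str.len s) true).foldl pvStepA []

-- ===== PORT B =====
def merge_similar_keywords_py_alt (keywords : List String) : List String :=
  if keywords = [] then []
  else
    let lows := keywords.map (fun kw => (PySem.Str.lower kw, PySem.Str.len kw))
    let ordered := PySem.List.sorted keywords (fun s => PySem.Str.len s) true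
    ordered.filter (fun k =>
      ! lows.any (fun p => PySem.Str.isIn (PySem.Str.lower k) p.1
                    && decide (PySem.Str.len k < p.2)))

-- ===== PRECONDITION & SPEC =====
def Spec_merge_similar_keywords_py (keywords : List String) (out : List String) : Prop := out = merge_similar_keywords_py_alt keywords
instance (keywords : List String) (out : List String) : Decidable (Spec_merge_similar_keywords_py keywords out) := by unfold Spec_merge_similar_keywords_py; infer_instance

-- ===== CLAIM (what is proved, stated in full; the proofs are below) =====
def Claim_equal_merge_similar_keywords_py : Prop := ∀ (keywords : List String), Dom_merge_similar_keywords_py keywords → Spec_merge_similar_keywords_py keywords (merge_similar_keywords_py keywords)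

-- ===== LEMMAS AND PROOFS =====

-- "o covers k": k.lower() is a substring of o.lower() and k is strictly shorter
def pvCov (o k : String) : Bool :=
  PySem.Str.isIn (PySem.Str.lower k) (PySem.Str.lower o)
    && decide (PySem.Str.len k < PySem.Str.len o)

-- B's keep-predicate
def pvKeep (keywords : List String) (k : String) : Bool :=
  ! keywords.any (fun o => pvCov o k)

lemma pvCov_trans {a b c : String} (h1 : pvCov a b = true) (h2 : pvCov b c = true) :
    pvCov a c = true := by
  simp only [pvCov, Bool.and_eq_true, decide_eq_true_eq, PySem.Str.isIn_iff_infix] at h1 h2 ⊢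
  exact ⟨h2.1.trans h1.1, lt_trans h2.2 h1.2⟩

lemma pvCov_irrefl (k : String) : pvCov k k = false := by
  simp [pvCov]

lemma pvCov_lt {o k : String} (h : pvCov o k = true) :
    PySem.Str.len k < PySem.Str.len o := by
  simp only [pvCov, Bool.and_eq_true, decide_eq_true_eq] at h
  exact h.2

lemma pvKeep_false_elim {keywords : List String} {k : String}
    (h : ¬ pvKeep keywords k = true) : ∃ o ∈ keywords, pvCov o k = true := by
  refine List.any_eq_true.mp ?_
  revert h; unfold pvKeep
  cases keywords.any (fun o => pvCov o k) <;> simp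

-- among the coverers of k there is one that B keeps (a longest one)
lemma pvExistsKept (keywords : List String) (k : String)
    (h : ∃ o ∈ keywords, pvCov o k = true) :
    ∃ o ∈ keywords, pvCov o k = true ∧ pvKeep keywords o = true := by
  set C := keywords.filter (fun o => pvCov o k) with hCdef
  have hCne : C ≠ [] := by
    obtain ⟨o, ho, hc⟩ := h
    intro hnil
    have hoC : o ∈ C := List.mem_filter.mpr ⟨ho, hc⟩
    rw [hnil] at hoC
    exact List.not_mem_nil hoC
  obtain ⟨c, hc⟩ : ∃ c, c ∈ C.argmax (fun s => PySem.Str.len s) := by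
    cases harg : C.argmax (fun s => PySem.Str.len s) with
    | none => exact absurd (List.argmax_eq_none.mp harg) hCne
    | some c => exact ⟨c, rfl⟩
  have hcC : c ∈ C := List.argmax_mem hc
  have hck : pvCov c k = true := (List.mem_filter.mp hcC).2
  refine ⟨c, (List.mem_filter.mp hcC).1, hck, ?_⟩
  by_contra hnk
  obtain ⟨o', ho', hoc⟩ := pvKeep_false_elim hnk
  have hoC : o' ∈ C := List.mem_filter.mpr ⟨ho', pvCov_trans hoc hck⟩
  have hle : PySem.Str.len o' ≤ PySem.Str.len c := List.le_of_mem_argmax hoC hc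
  have hlt : PySem.Str.len c < PySem.Str.len o' := pvCov_lt hoc
  omega

-- A's inner scan, when every element of merged is at least as long as k,
-- reduces to a membership test for a coverer (the 'replace' branch is dead)
lemma pvScanA_eq (k : String) (l : List String)
    (h : ∀ e ∈ l, ¬ (PySem.Str.len e < PySem.Str.len k)) :
    pvScanA k l = if l.any (fun e => pvCov e k) then .covered else .fall := by
  induction l with
  | nil => simp [pvScanA]
  | cons e rest ih =>
    have he : ¬ (PySem.Str.len e < PySem.Str.len k) := h e List.mem_cons_self
    have ih' := ih (fun x hx => h x (List.mem_cons_of_mem _ hx))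
    have h2 : (PySem.Str.isIn (PySem.Str.lower e) (PySem.Str.lower k)
        && decide (PySem.Str.len e < PySem.Str.len k)) = false := by
      simp only [Bool.and_eq_false_iff, decide_eq_false_iff_not]
      exact Or.inr he
    simp only [pvScanA, List.any_cons, h2, Bool.false_eq_true, if_false, ih']
    by_cases hc : pvCov e k = true
    · have hc' : (PySem.Str.isIn (PySem.Str.lower k) (PySem.Str.lower e)
          && decide (PySem.Str.len k < PySem.Str.len e)) = true := hc
      rw [if_pos hc', if_pos (show ((pvCov e k || rest.any fun e => pvCov e k) = true)
        by rw [hc, Bool.true_or])]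
    · have hc0 : pvCov e k = false := by revert hc; cases pvCov e k <;> simp
      have hc' : (PySem.Str.isIn (PySem.Str.lower k) (PySem.Str.lower e)
          && decide (PySem.Str.len k < PySem.Str.len e)) = false := hc0
      rw [if_neg (show ¬ ((PySem.Str.isIn (PySem.Str.lower k) (PySem.Str.lower e)
          && decide (PySem.Str.len k < PySem.Str.len e)) = true)
        by rw [hc']; exact Bool.false_ne_true)]
      simp only [hc0, Bool.false_or]

-- A's loop over the length-sorted tail, started from the filtered processed prefix,
-- produces the filtered whole
lemma pvLoop (keywords : List String) (todo : List String) :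
    ∀ done : List String,
    (done ++ todo).Perm keywords →
    (done ++ todo).Pairwise (fun a b => PySem.Str.len b ≤ PySem.Str.len a) →
    todo.foldl pvStepA (done.filter (pvKeep keywords))
      = (done ++ todo).filter (pvKeep keywords) := by
  induction todo with
  | nil => intro done _ _; simp
  | cons k todo ih =>
    intro done hperm hsort
    obtain ⟨hd, ht, hcross⟩ := List.pairwise_append.mp hsort
    have hmerged_long : ∀ e ∈ done.filter (pvKeep keywords),
        ¬ (PySem.Str.len e < PySem.Str.len k) := by
      intro e he
      have := hcross e (List.mem_of_mem_filter he) k List.mem_cons_self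
      omega
    have hstep : pvStepA (done.filter (pvKeep keywords)) k
        = (done ++ [k]).filter (pvKeep keywords) := by
      unfold pvStepA
      rw [pvScanA_eq k _ hmerged_long]
      by_cases hc : (done.filter (pvKeep keywords)).any (fun e => pvCov e k) = true
      · -- some kept earlier keyword covers k: A skips k, B filters it out
        have hkk : pvKeep keywords k = false := by
          obtain ⟨e, he, hek⟩ := List.any_eq_true.mp hc
          have heK : e ∈ keywords := hperm.mem_iff.mp
            (List.mem_append.mpr (Or.inl (List.mem_of_mem_filter he)))
          have hany : keywords.any (fun o => pvCov o k) = true :=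
            List.any_eq_true.mpr ⟨e, heK, hek⟩
          simp [pvKeep, hany]
        simp [hc, List.filter_append, hkk]
      · -- nobody kept covers k: show nobody in keywords covers k at all
        have hkk : pvKeep keywords k = true := by
          by_contra hnk
          obtain ⟨o, hoK, hok, hkeepo⟩ := pvExistsKept keywords k (pvKeep_false_elim hnk)
          have hoS : o ∈ done ++ k :: todo := hperm.symm.mem_iff.mp hoK
          have holt : PySem.Str.len k < PySem.Str.len o := pvCov_lt hok
          have hodone : o ∈ done := by
            rcases List.mem_append.mp hoS with h1 | h2
            · exact h1
            · rcases List.mem_cons.mp h2 with rfl | h3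
              · rw [pvCov_irrefl] at hok; cases hok
              · have := (List.pairwise_cons.mp ht).1 o h3
                omega
          have hom : o ∈ done.filter (pvKeep keywords) :=
            List.mem_filter.mpr ⟨hodone, hkeepo⟩
          exact hc (List.any_eq_true.mpr ⟨o, hom, hok⟩)
        simp [hc, List.filter_append, hkk]
    rw [List.foldl_cons, hstep]
    have hassoc : (done ++ [k]) ++ todo = done ++ k :: todo := by simp
    have hrec := ih (done ++ [k]) (by rw [hassoc]; exact hperm) (by rw [hassoc]; exact hsort)
    rw [hrec, hassoc]

lemma pvMain (keywords : List String) :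
    merge_similar_keywords_py keywords = merge_similar_keywords_py_alt keywords := by
  unfold merge_similar_keywords_py merge_similar_keywords_py_alt
  by_cases hnil : keywords = []
  · simp [hnil]
  · rw [if_neg hnil, if_neg hnil]
    have hA := pvLoop keywords
      (PySem.List.sorted keywords (fun s => PySem.Str.len s) true) []
      (by simpa using PySem.List.sorted_perm keywords (fun s => PySem.Str.len s) true)
      (by simpa using PySem.List.sorted_pairwise_rev keywords (fun s => PySem.Str.len s))
    simp only [List.filter_nil, List.nil_append] at hA
    rw [hA]
    refine List.filter_congr ?_
    intro k _
    simp only [pvKeep, pvCov, List.any_map, Function.comp_def]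

-- ===== VERDICT (by name: the statement is the Claim_ definition above) =====
theorem merge_similar_keywords_py_spec : Claim_equal_merge_similar_keywords_py := by
  intro keywords _
  unfold Spec_merge_similar_keywords_py
  exact pvMain keywords
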